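-- pv_equiv track=rewrite | github.com/Dfreequark/30-days-of-python | D17_game_2048.py | shift_right
-- ===== SOURCE A (Python) =====
-- def shift_right(row):
--     i=3
--     while i!=0:
--         if row[i]==0:
--             for j in range(1,i+1):
--                 if row[i-j]!=0:
--                     row[i]=row[i-j]
--                     row[i-j]=0
--                     break
--         else:
--             i-=1
--             continue
--         i-=1
--     return row
-- ===== SOURCE B (Python) =====
-- def shift_right(row):
--     vals = [v for v in (row[0], row[1], row[2], row[3]) if v != 0]
--     row[0:4] = [0] * (4 - len(vals)) + vals
--     return row
-- ===== Notes on version B (the rewrite author's own statement) =====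
-- stated objective: simpler
-- what changed: A's right-to-left scan with a nested search-and-swap inner loop is replaced by one pass that collects the nonzero entries of the first four cells and rewrites row[0:4] as left-padded zeros plus those values.
import Mathlib
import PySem

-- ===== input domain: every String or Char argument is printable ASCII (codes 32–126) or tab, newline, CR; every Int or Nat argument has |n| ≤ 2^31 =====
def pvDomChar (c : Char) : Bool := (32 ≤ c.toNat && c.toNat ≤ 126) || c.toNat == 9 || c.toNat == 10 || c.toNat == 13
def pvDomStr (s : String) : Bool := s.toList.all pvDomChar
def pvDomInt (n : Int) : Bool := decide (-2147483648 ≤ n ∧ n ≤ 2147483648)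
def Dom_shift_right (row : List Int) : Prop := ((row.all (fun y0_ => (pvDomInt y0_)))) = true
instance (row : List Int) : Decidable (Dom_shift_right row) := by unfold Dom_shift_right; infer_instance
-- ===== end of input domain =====

-- B replaces A's right-to-left scan with nested search-and-swap over the first four cells by a
-- single collect-nonzeros-then-left-pad rebuild of those cells (simpler); the equivalence proved
-- here is about the RETURN value only (both Pythons mutate the argument in place and return it).


-- ===== PORT A =====
-- inner 'for j in range(1, i+1): if row[i-j]!=0: row[i]=row[i-j]; row[i-j]=0; break'
-- (the branch runs only under j ≤ i, where Python's i-j equals the Nat subtraction used here)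
def pvInnerA (row : List Int) (i j : Nat) : List Int :=
  if _h : j ≤ i then
    match PySem.List.pyGet? row ((i - j : Nat) : Int) with
    | none => row            -- Python raises IndexError here (outside Pre_)
    | some v =>
      if v ≠ 0 then (row.set i v).set (i - j) 0
      else pvInnerA row i (j + 1)
  else row
termination_by i + 1 - j

-- outer 'while i != 0: …; i -= 1' with i counting 3, 2, 1
def pvOuterA (row : List Int) (i : Nat) : List Int :=
  match i with
  | 0 => row
  | Nat.succ k =>
    match PySem.List.pyGet? row ((k + 1 : Nat) : Int) with
    | none => row            -- Python raises IndexError here (outside Pre_)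
    | some v => if v = 0 then pvOuterA (pvInnerA row (k + 1) 1) k else pvOuterA row k

def shift_right (row : List Int) : List Int := pvOuterA row 3

-- ===== PORT B =====
def shift_right_alt (row : List Int) : List Int :=
  match PySem.List.pyGet? row 0, PySem.List.pyGet? row 1,
        PySem.List.pyGet? row 2, PySem.List.pyGet? row 3 with
  | some a, some b, some c, some d =>
    -- vals = [v for v in (row[0], row[1], row[2], row[3]) if v != 0]
    let vals := [a, b, c, d].filter (fun v => v ≠ 0)
    -- row[0:4] = [0]*(4-len(vals)) + vals
    (List.replicate (4 - vals.length) 0 ++ vals) ++ row.drop 4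
  | _, _, _, _ => row        -- Python raises IndexError here (outside Pre_)

-- ===== PRECONDITION & SPEC =====
-- Pre_ excludes exactly the rows of length < 4, on which both Pythons raise IndexError.
def Pre_shift_right (row : List Int) : Prop := 4 ≤ row.length
instance (row : List Int) : Decidable (Pre_shift_right row) := by unfold Pre_shift_right; infer_instance
def pvWitness_shift_right : List Int := [0, 2, 0, 2]

def Spec_shift_right (row : List Int) (out : List Int) : Prop := out = shift_right_alt row
instance (row : List Int) (out : List Int) : Decidable (Spec_shift_right row out) := by unfold Spec_shift_right; infer_instance

-- ===== CLAIM (what is proved, stated in full; the proofs are below) =====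
def Claim_equal_shift_right : Prop := ∀ (row : List Int), Dom_shift_right row → Pre_shift_right row → Spec_shift_right row (shift_right row)

-- ===== LEMMAS AND PROOFS =====
-- evaluation of row[k] and row.set k v on a row with at least four cells, k = 0..3
@[simp] lemma pvGet0 (a b c d : Int) (t : List Int) : PySem.List.pyGet? (a::b::c::d::t) (0:Int) = some a := by
  rw [show (0:Int) = ((0:Nat):Int) by norm_num, PySem.List.pyGet?_natCast]; rfl
@[simp] lemma pvGet1 (a b c d : Int) (t : List Int) : PySem.List.pyGet? (a::b::c::d::t) (1:Int) = some b := by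
  rw [show (1:Int) = ((1:Nat):Int) by norm_num, PySem.List.pyGet?_natCast]; rfl
@[simp] lemma pvGet2 (a b c d : Int) (t : List Int) : PySem.List.pyGet? (a::b::c::d::t) (2:Int) = some c := by
  rw [show (2:Int) = ((2:Nat):Int) by norm_num, PySem.List.pyGet?_natCast]; rfl
@[simp] lemma pvGet3 (a b c d : Int) (t : List Int) : PySem.List.pyGet? (a::b::c::d::t) (3:Int) = some d := by
  rw [show (3:Int) = ((3:Nat):Int) by norm_num, PySem.List.pyGet?_natCast]; rfl
@[simp] lemma pvSet0 (a b c d v : Int) (t : List Int) : (a::b::c::d::t).set 0 v = v::b::c::d::t := rfl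
@[simp] lemma pvSet1 (a b c d v : Int) (t : List Int) : (a::b::c::d::t).set 1 v = a::v::c::d::t := rfl
@[simp] lemma pvSet2 (a b c d v : Int) (t : List Int) : (a::b::c::d::t).set 2 v = a::b::v::d::t := rfl
@[simp] lemma pvSet3 (a b c d v : Int) (t : List Int) : (a::b::c::d::t).set 3 v = a::b::c::v::t := rfl

set_option maxHeartbeats 2000000 in
lemma shift_right_cons_eq (a b c d : Int) (t : List Int) :
    shift_right (a :: b :: c :: d :: t) = shift_right_alt (a :: b :: c :: d :: t) := by
  by_cases ha : a = 0 <;> by_cases hb : b = 0 <;> by_cases hc : c = 0 <;> by_cases hd : d = 0 <;>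
    simp [shift_right, shift_right_alt, pvOuterA, pvInnerA, ha, hb, hc, hd]

-- ===== VERDICT (by name: the statement is the Claim_ definition above) =====
theorem shift_right_spec : Claim_equal_shift_right := by
  intro row _ hpre
  unfold Spec_shift_right
  match row, hpre with
  | a :: b :: c :: d :: t, _ => exact shift_right_cons_eq a b c d t
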